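-- pv_equiv track=rewrite | github.com/tinoduong/whoop-to-fitbit | src/fitbit_add_meal.py | find_meal_record
-- ===== SOURCE A (Python) =====
-- def find_meal_record(db, meal_type, date_str):
--     """Find the most recent meal record matching meal_type and date."""
--     matches = [
--         (i, r) for i, r in enumerate(db)
--         if r["date"] == date_str and r["meal_type"].lower() == meal_type.lower()
--     ]
--     if not matches:
--         return None, None
--     return matches[-1]
-- ===== SOURCE B (Python) =====
-- def find_meal_record(db, meal_type, date_str):
--     """Find the most recent meal record matching meal_type and date."""
--     mt = meal_type.lower()
--     for i in range(len(db) - 1, -1, -1):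
--         r = db[i]
--         if r["date"] == date_str and r["meal_type"].lower() == mt:
--             return i, r
--     return None, None
-- ===== Notes on version B (the rewrite author's own statement) =====
-- stated objective: alternative
-- what changed: Replaces the full enumerate-filter pass that builds a list of all matches and indexes [-1] with a reverse index loop that returns at the first match found scanning from the end.
import Mathlib
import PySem

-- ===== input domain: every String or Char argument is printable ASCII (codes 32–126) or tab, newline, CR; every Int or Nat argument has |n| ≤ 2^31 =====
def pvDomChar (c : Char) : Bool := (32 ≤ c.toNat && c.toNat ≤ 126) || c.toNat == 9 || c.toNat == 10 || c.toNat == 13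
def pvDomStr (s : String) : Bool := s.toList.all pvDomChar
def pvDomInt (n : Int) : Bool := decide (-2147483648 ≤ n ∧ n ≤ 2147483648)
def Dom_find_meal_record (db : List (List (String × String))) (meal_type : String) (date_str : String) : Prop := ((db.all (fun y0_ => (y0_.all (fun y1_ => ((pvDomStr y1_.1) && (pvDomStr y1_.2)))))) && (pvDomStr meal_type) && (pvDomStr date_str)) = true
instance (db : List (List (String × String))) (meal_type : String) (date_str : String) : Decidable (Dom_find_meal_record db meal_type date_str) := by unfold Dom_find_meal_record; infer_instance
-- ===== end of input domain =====

-- B replaces A's build-all-matches-then-take-last pass by a reverse-index early-exit scan (alternative decomposition, same result).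


-- shared record predicate: r["date"] == date_str and r["meal_type"].lower() == meal_type.lower()
-- (the KeyError cases where the getD default would matter are excluded by Pre_)
def pvMatch (mt date_str : String) (r : List (String × String)) : Bool :=
  (PySem.Dict.mk r).getD "date" "" == date_str &&
  PySem.Str.lower ((PySem.Dict.mk r).getD "meal_type" "") == mt

-- ===== PORT A =====
def find_meal_record (db : List (List (String × String))) (meal_type : String) (date_str : String) : Option Int × (Option (List (String × String))) :=
  let hits := (PySem.List.enumerate db).filter (fun p => pvMatch (PySem.Str.lower meal_type) date_str p.2)
  -- 'if not matches: return None, None; return matches[-1]'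
  match PySem.List.pyGet? hits (-1) with
  | none => (none, none)
  | some (i, r) => (some i, some r)

-- ===== PORT B =====
-- 'for i in range(len(db)-1, -1, -1): …' — scan the enumerated records in reverse order, stop at the first hit
def pvFindLoop (mt date_str : String) : List (Int × List (String × String)) → Option Int × (Option (List (String × String)))
  | [] => (none, none)
  | (i, r) :: rest => if pvMatch mt date_str r then (some i, some r) else pvFindLoop mt date_str rest

def find_meal_record_alt (db : List (List (String × String))) (meal_type : String) (date_str : String) : Option Int × (Option (List (String × String))) :=
  let mt := PySem.Str.lower meal_type
  pvFindLoop mt date_str ((PySem.List.enumerate db).reverse)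

-- ===== PRECONDITION & SPEC =====
-- Pre_ excludes exactly the KeyError inputs: a record without a "date" key, or one whose "date"
-- matches date_str but has no "meal_type" key — Python's A raises there.
def Pre_find_meal_record (db : List (List (String × String))) (meal_type : String) (date_str : String) : Prop :=
  ∀ r ∈ db, (PySem.Dict.mk r).contains "date" = true ∧
    ((PySem.Dict.mk r).getD "date" "" = date_str → (PySem.Dict.mk r).contains "meal_type" = true)
instance (db : List (List (String × String))) (meal_type : String) (date_str : String) : Decidable (Pre_find_meal_record db meal_type date_str) := by unfold Pre_find_meal_record; infer_instance

def pvWitness_find_meal_record : (List (List (String × String))) × String × String :=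
  ([[("date", "2024-01-01"), ("meal_type", "Lunch")], [("date", "2024-01-02")]], "lunch", "2024-01-01")

def Spec_find_meal_record (db : List (List (String × String))) (meal_type : String) (date_str : String) (out : Option Int × (Option (List (String × String)))) : Prop := out = find_meal_record_alt db meal_type date_str
instance (db : List (List (String × String))) (meal_type : String) (date_str : String) (out : Option Int × (Option (List (String × String)))) : Decidable (Spec_find_meal_record db meal_type date_str out) := by unfold Spec_find_meal_record; infer_instance

-- ===== CLAIM (what is proved, stated in full; the proofs are below) =====
def Claim_equal_find_meal_record : Prop := ∀ (db : List (List (String × String))) (meal_type : String) (date_str : String), Dom_find_meal_record db meal_type date_str → Pre_find_meal_record db meal_type date_str → Spec_find_meal_record db meal_type date_str (find_meal_record db meal_type date_str)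

-- ===== LEMMAS AND PROOFS =====

theorem pvFindLoop_eq_find? (mt ds : String) (l : List (Int × List (String × String))) :
    pvFindLoop mt ds l = match l.find? (fun p => pvMatch mt ds p.2) with
      | none => (none, none)
      | some (i, r) => (some i, some r) := by
  induction l with
  | nil => rfl
  | cons h t ih =>
    obtain ⟨i, r⟩ := h
    by_cases hc : pvMatch mt ds r
    · simp [pvFindLoop, hc]
    · simp only [Bool.not_eq_true] at hc
      simp [pvFindLoop, hc, ih]

theorem find?_eq_head?_filter {α : Type} (p : α → Bool) (l : List α) :
    l.find? p = (l.filter p).head? := by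
  induction l with
  | nil => rfl
  | cons h t ih =>
    by_cases hc : p h
    · rw [List.find?_cons_of_pos hc, List.filter_cons_of_pos hc, List.head?_cons]
    · rw [List.find?_cons_of_neg (by simp [hc]), List.filter_cons_of_neg (by simp [hc]), ih]

theorem find?_reverse_eq_getLast?_filter {α : Type} (p : α → Bool) (l : List α) :
    l.reverse.find? p = (l.filter p).getLast? := by
  rw [find?_eq_head?_filter, List.filter_reverse, List.head?_reverse]

theorem find_meal_record_spec : Claim_equal_find_meal_record := by
  intro db meal_type date_str _ _
  unfold Spec_find_meal_record find_meal_record find_meal_record_alt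
  simp only []
  rw [pvFindLoop_eq_find?, find?_reverse_eq_getLast?_filter, PySem.List.pyGet?_neg_one]
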